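-- pv_equiv track=rewrite | github.com/World-Snapshot/papers-with-code | scripts/analyze_pwc_client.py | get_task_depth
-- ===== SOURCE A (Python) =====
-- def get_task_depth(task, hierarchy, current_depth=0, visited=None):
--     if visited is None:
--         visited = set()
--
--     if task in visited:
--         return current_depth
--
--     visited.add(task)
--
--     if task not in hierarchy or not hierarchy[task]:
--         return current_depth
--
--     max_depth = current_depth
--     for subtask in hierarchy[task]:
--         depth = get_task_depth(subtask, hierarchy, current_depth + 1, visited)
--         max_depth = max(max_depth, depth)
--
--     return max_depth
-- ===== SOURCE B (Python) =====
-- def get_task_depth(task, hierarchy, current_depth=0, visited=None):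
--     # Iterative DFS with an explicit stack instead of recursion (return value identical;
--     # mutates the passed-in visited set just like the recursive version).
--     if visited is None:
--         visited = set()
--     result = current_depth
--     stack = [(task, current_depth)]
--     while stack:
--         node, depth = stack.pop()
--         result = max(result, depth)
--         if node in visited:
--             continue
--         visited.add(node)
--         children = hierarchy.get(node)
--         if children:
--             for child in reversed(children):
--                 stack.append((child, depth + 1))
--     return result
-- ===== Notes on version B (the rewrite author's own statement) =====
-- stated objective: alternative
-- what changed: Replaces A's recursion (one call per node, implicit call stack, per-call max over children) by an iterative DFS driven by an explicit stack of (node, depth) pairs that accumulates a single running maximum, pushing children reversed so the LIFO order reproduces A's left-to-right expansion.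
import Mathlib
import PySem

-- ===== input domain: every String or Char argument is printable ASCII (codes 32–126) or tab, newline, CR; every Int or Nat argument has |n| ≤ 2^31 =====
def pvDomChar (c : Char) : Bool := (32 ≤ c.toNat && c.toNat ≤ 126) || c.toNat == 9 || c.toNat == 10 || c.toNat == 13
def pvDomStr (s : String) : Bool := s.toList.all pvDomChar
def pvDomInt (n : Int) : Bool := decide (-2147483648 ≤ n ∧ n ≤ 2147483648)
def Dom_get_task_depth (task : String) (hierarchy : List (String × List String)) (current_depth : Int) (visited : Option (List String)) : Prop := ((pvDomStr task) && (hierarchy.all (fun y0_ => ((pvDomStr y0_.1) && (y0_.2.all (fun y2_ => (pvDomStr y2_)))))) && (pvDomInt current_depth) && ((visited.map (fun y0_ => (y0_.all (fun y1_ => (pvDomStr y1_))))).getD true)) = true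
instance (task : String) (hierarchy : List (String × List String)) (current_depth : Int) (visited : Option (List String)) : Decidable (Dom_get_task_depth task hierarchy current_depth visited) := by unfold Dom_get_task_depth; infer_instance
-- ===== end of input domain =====

-- B replaces A's recursion by an iterative DFS with an explicit stack (different decomposition, same cost).
-- Python mutates the passed-in `visited` set; A and B perform the identical mutation, and the equivalence
-- proved here is about the RETURN value (the ports thread `visited` as explicit state).

-- ===== PORT A =====
-- A's recursion with `visited` threaded as state (Python mutates one shared set) and a fuel parameter
-- guarding termination only: each nested expansion adds a fresh hierarchy key to `visited`, so the fuel
-- `hierarchy.length + 1` used by the entry point never runs out (lemma `get_task_depth_bridge` below).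
def get_task_depth_goA (hierarchy : List (String × List String)) :
    Nat → String → Int → PySem.Set String → Int × PySem.Set String
  | 0, _, current_depth, visited => (current_depth, visited)   -- unreachable with the fuel used
  | fuel+1, task, current_depth, visited =>
    if PySem.Set.contains visited task then (current_depth, visited)
    else
      let visited' := PySem.Set.add visited task
      -- `task not in hierarchy or not hierarchy[task]`: the dict lookup misses or yields []
      match (PySem.Dict.mk hierarchy).get? task with
      | none => (current_depth, visited')
      | some subtasks =>
        if subtasks = [] then (current_depth, visited')
        else
          -- the `for subtask in hierarchy[task]` loop, state = (max_depth, visited)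
          subtasks.foldl
            (fun acc subtask =>
              let r := get_task_depth_goA hierarchy fuel subtask (current_depth + 1) acc.2
              (max acc.1 r.1, r.2))
            (current_depth, visited')

def get_task_depth (task : String) (hierarchy : List (String × List String)) (current_depth : Int) (visited : Option (List String)) : Int :=
  let vis0 := match visited with
    | none => PySem.Set.empty
    | some l => PySem.Set.ofList l
  (get_task_depth_goA hierarchy (hierarchy.length + 1) task current_depth vis0).1

-- ===== PORT B =====
-- number of hierarchy keys not yet visited: the termination measure of B's stack loop
def get_task_depth_unvis (hierarchy : List (String × List String)) (visited : PySem.Set String) : Nat :=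
  (hierarchy.map Prod.fst).countP (fun k => !(PySem.Set.contains visited k))

-- countP strictly drops when one element's predicate flips from true to false (used for termination)
lemma get_task_depth_countP_lt {α : Type} (l : List α) (p q : α → Bool)
    (hmono : ∀ a ∈ l, q a = true → p a = true) (a : α) (ha : a ∈ l)
    (hp : p a = true) (hq : q a = false) : l.countP q < l.countP p := by
  induction l with
  | nil => simp at ha
  | cons b t ih =>
    rw [List.countP_cons, List.countP_cons]
    rcases List.mem_cons.mp ha with h | h
    · subst h
      have hle := List.countP_mono_left (l := t) (p := q) (q := p)
        (fun x hx => hmono x (List.mem_cons_of_mem _ hx))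
      rw [hp, hq]
      simp
      omega
    · have ih' := ih (fun x hx => hmono x (List.mem_cons_of_mem _ hx)) h
      have hhead := hmono b (List.mem_cons_self ..)
      split_ifs with h1 h2 <;> first | omega | (exact absurd (hhead h1) (by simp [h2]))

lemma get_task_depth_unvis_mono (hierarchy : List (String × List String))
    (v w : PySem.Set String) (hsub : ∀ x, x ∈ v → x ∈ w) :
    get_task_depth_unvis hierarchy w ≤ get_task_depth_unvis hierarchy v := by
  apply List.countP_mono_left
  intro a _ hb
  have hnb : a ∉ w := by simpa using hb
  have : a ∉ v := fun h => hnb (hsub a h)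
  simpa using this

lemma get_task_depth_unvis_add_not_key (hierarchy : List (String × List String))
    (vis : PySem.Set String) (node : String)
    (h2 : (PySem.Dict.mk hierarchy).get? node = none) :
    get_task_depth_unvis hierarchy (PySem.Set.add vis node) = get_task_depth_unvis hierarchy vis := by
  have hnk : node ∉ (hierarchy.map Prod.fst) := by
    have := (PySem.Dict.get?_eq_none_iff_not_mem_keys (PySem.Dict.mk hierarchy) node).mp h2
    simpa [PySem.Dict.keys_mk] using this
  apply Nat.le_antisymm
  · exact get_task_depth_unvis_mono hierarchy vis (PySem.Set.add vis node)
      (fun x hx => (PySem.Set.mem_add vis node x).mpr (Or.inl hx))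
  · apply List.countP_mono_left
    intro a ha hb
    have hne : a ≠ node := fun h => hnk (h ▸ ha)
    have hnb : a ∉ vis := by simpa using hb
    have : a ∉ PySem.Set.add vis node := fun h => by
      rcases (PySem.Set.mem_add vis node a).mp h with h' | h'
      · exact hnb h'
      · exact hne h'
    simpa using this

lemma get_task_depth_unvis_add_key_lt (hierarchy : List (String × List String))
    (vis : PySem.Set String) (node : String) (cs : List String)
    (h2 : (PySem.Dict.mk hierarchy).get? node = some cs)
    (h1 : PySem.Set.contains vis node = false) :
    get_task_depth_unvis hierarchy (PySem.Set.add vis node) < get_task_depth_unvis hierarchy vis := by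
  have hkey : node ∈ hierarchy.map Prod.fst := by
    have hc : (PySem.Dict.mk hierarchy).contains node = true := by
      rw [PySem.Dict.contains_eq_isSome_get?, h2]; rfl
    have := (PySem.Dict.contains_iff_mem_keys (PySem.Dict.mk hierarchy) node).mp hc
    simpa [PySem.Dict.keys_mk] using this
  apply get_task_depth_countP_lt _ _ _ _ node hkey
  · simpa using h1
  · have : node ∈ PySem.Set.add vis node := (PySem.Set.mem_add vis node node).mpr (Or.inr rfl)
    simp [this]
  · intro a _ hb
    have hnb : a ∉ PySem.Set.add vis node := by simpa using hb
    have : a ∉ vis := fun h => hnb ((PySem.Set.mem_add vis node a).mpr (Or.inl h))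
    simpa using this

-- B's while-loop over the explicit stack.  Python's stack has its top at the END and pushes the
-- children REVERSED; modelling the stack with its top at the HEAD, that is exactly prepending the
-- children left-to-right: `children.map (·, depth+1) ++ rest`.
def get_task_depth_runB (hierarchy : List (String × List String)) :
    List (String × Int) → Int → PySem.Set String → Int
  | [], result, _ => result
  | (node, depth) :: rest, result, visited =>
    let result' := max result depth
    if h1 : PySem.Set.contains visited node then
      get_task_depth_runB hierarchy rest result' visited
    else
      let visited' := PySem.Set.add visited node
      match h2 : (PySem.Dict.mk hierarchy).get? node with
      | none => get_task_depth_runB hierarchy rest result' visited'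
      | some children =>
        if children = [] then get_task_depth_runB hierarchy rest result' visited'
        else get_task_depth_runB hierarchy (children.map (fun c => (c, depth + 1)) ++ rest) result' visited'
  termination_by stack _ visited => (get_task_depth_unvis hierarchy visited, stack.length)
  decreasing_by
  · exact Prod.Lex.right _ (Nat.lt_succ_self _)
  · rw [get_task_depth_unvis_add_not_key hierarchy visited node h2]
    exact Prod.Lex.right _ (Nat.lt_succ_self _)
  · exact Prod.Lex.left _ _
      (get_task_depth_unvis_add_key_lt hierarchy visited node children h2 (by simpa using h1))
  · exact Prod.Lex.left _ _
      (get_task_depth_unvis_add_key_lt hierarchy visited node children h2 (by simpa using h1))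

def get_task_depth_alt (task : String) (hierarchy : List (String × List String)) (current_depth : Int) (visited : Option (List String)) : Int :=
  let vis0 := match visited with
    | none => PySem.Set.empty
    | some l => PySem.Set.ofList l
  get_task_depth_runB hierarchy [(task, current_depth)] current_depth vis0

-- ===== PRECONDITION & SPEC =====
def Spec_get_task_depth (task : String) (hierarchy : List (String × List String)) (current_depth : Int) (visited : Option (List String)) (out : Int) : Prop := out = get_task_depth_alt task hierarchy current_depth visited
instance (task : String) (hierarchy : List (String × List String)) (current_depth : Int) (visited : Option (List String)) (out : Int) : Decidable (Spec_get_task_depth task hierarchy current_depth visited out) := by unfold Spec_get_task_depth; infer_instance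

-- ===== CLAIM (what is proved, stated in full; the proofs are below) =====
def Claim_equal_get_task_depth : Prop := ∀ (task : String) (hierarchy : List (String × List String)) (current_depth : Int) (visited : Option (List String)), Dom_get_task_depth task hierarchy current_depth visited → Spec_get_task_depth task hierarchy current_depth visited (get_task_depth task hierarchy current_depth visited)

-- ===== LEMMAS AND PROOFS =====

-- A's recursion only ever ADDS to the visited set
lemma get_task_depth_goA_snd_mem (hierarchy : List (String × List String)) :
    ∀ (fuel : Nat) (t : String) (d : Int) (vis : PySem.Set String) (x : String),
      x ∈ vis → x ∈ (get_task_depth_goA hierarchy fuel t d vis).2 := by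
  intro fuel
  induction fuel with
  | zero => intro t d vis x hx; simpa [get_task_depth_goA] using hx
  | succ f ih =>
    intro t d vis x hx
    have hfold : ∀ (cs : List String) (acc : Int × PySem.Set String), x ∈ acc.2 →
        x ∈ (cs.foldl (fun acc subtask =>
              let r := get_task_depth_goA hierarchy f subtask (d + 1) acc.2
              (max acc.1 r.1, r.2)) acc).2 := by
      intro cs
      induction cs with
      | nil => intro acc h; simpa using h
      | cons c cst ihc =>
        intro acc h
        simp only [List.foldl_cons]
        exact ihc _ (ih c (d + 1) acc.2 x h)
    rw [get_task_depth_goA]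
    split
    · exact hx
    · have hx' : x ∈ PySem.Set.add vis t := (PySem.Set.mem_add vis t x).mpr (Or.inl hx)
      split
      · exact hx'
      · split
        · exact hx'
        · exact hfold _ _ hx'

-- A's result is at least the starting depth
lemma get_task_depth_goA_fst_le (hierarchy : List (String × List String))
    (fuel : Nat) (t : String) (d : Int) (vis : PySem.Set String) :
    d ≤ (get_task_depth_goA hierarchy fuel t d vis).1 := by
  cases fuel with
  | zero => simp [get_task_depth_goA]
  | succ f =>
    have hfold : ∀ (cs : List String) (acc : Int × PySem.Set String),
        acc.1 ≤ (cs.foldl (fun acc subtask =>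
              let r := get_task_depth_goA hierarchy f subtask (d + 1) acc.2
              (max acc.1 r.1, r.2)) acc).1 := by
      intro cs
      induction cs with
      | nil => intro acc; simp
      | cons c cst ihc =>
        intro acc
        simp only [List.foldl_cons]
        exact le_trans (le_max_left _ _) (ihc _)
    rw [get_task_depth_goA]
    split
    · simp
    · split
      · simp
      · split
        · simp
        · exact hfold _ (d, PySem.Set.add vis t)

-- expanding the children on B's stack = A's fold over the children (inner loop of the bridge)
lemma get_task_depth_bridge_fold (hierarchy : List (String × List String)) (f : Nat) (d : Int)
    (IH : ∀ (vis : PySem.Set String), get_task_depth_unvis hierarchy vis + 1 ≤ f →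
      ∀ (t : String) (d' : Int) (rest : List (String × Int)) (res : Int),
        get_task_depth_runB hierarchy ((t, d') :: rest) res vis =
          get_task_depth_runB hierarchy rest (max res (get_task_depth_goA hierarchy f t d' vis).1)
            (get_task_depth_goA hierarchy f t d' vis).2) :
    ∀ (cs : List String) (acc : Int × PySem.Set String) (rest : List (String × Int)) (res : Int),
      get_task_depth_unvis hierarchy acc.2 + 1 ≤ f →
      get_task_depth_runB hierarchy (cs.map (fun c => (c, d + 1)) ++ rest) (max res acc.1) acc.2 =
        get_task_depth_runB hierarchy rest
          (max res (cs.foldl (fun acc subtask =>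
              let r := get_task_depth_goA hierarchy f subtask (d + 1) acc.2
              (max acc.1 r.1, r.2)) acc).1)
          (cs.foldl (fun acc subtask =>
              let r := get_task_depth_goA hierarchy f subtask (d + 1) acc.2
              (max acc.1 r.1, r.2)) acc).2 := by
  intro cs
  induction cs with
  | nil => intro acc rest res _; simp
  | cons c cst ihc =>
    intro acc rest res hcond
    simp only [List.map_cons, List.cons_append, List.foldl_cons]
    rw [IH acc.2 hcond c (d + 1) (cst.map (fun c => (c, d + 1)) ++ rest) (max res acc.1)]
    rw [max_assoc]
    have hsub := get_task_depth_goA_snd_mem hierarchy f c (d + 1) acc.2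
    have hle := get_task_depth_unvis_mono hierarchy acc.2
      (get_task_depth_goA hierarchy f c (d + 1) acc.2).2 (fun x hx => hsub x hx)
    exact ihc (max acc.1 (get_task_depth_goA hierarchy f c (d + 1) acc.2).1,
      (get_task_depth_goA hierarchy f c (d + 1) acc.2).2) rest res
      (by show get_task_depth_unvis hierarchy (get_task_depth_goA hierarchy f c (d + 1) acc.2).2 + 1 ≤ f
          omega)

-- the bridge: one pop of B's stack machine computes exactly one call of A's recursion
lemma get_task_depth_bridge (hierarchy : List (String × List String)) :
    ∀ (fuel : Nat) (vis : PySem.Set String), get_task_depth_unvis hierarchy vis + 1 ≤ fuel →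
      ∀ (t : String) (d : Int) (rest : List (String × Int)) (res : Int),
        get_task_depth_runB hierarchy ((t, d) :: rest) res vis =
          get_task_depth_runB hierarchy rest (max res (get_task_depth_goA hierarchy fuel t d vis).1)
            (get_task_depth_goA hierarchy fuel t d vis).2 := by
  intro fuel
  induction fuel with
  | zero => intro vis hcond; omega
  | succ f ih =>
    intro vis hcond t d rest res
    rw [get_task_depth_runB, get_task_depth_goA]
    cases hc : PySem.Set.contains vis t with
    | true => simp
    | false =>
      simp only
      cases hg : (PySem.Dict.mk hierarchy).get? t with
      | none => simp
      | some cs =>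
        cases hcs : decide (cs = []) with
        | true =>
          have : cs = [] := of_decide_eq_true hcs
          subst this
          simp
        | false =>
          have hne : cs ≠ [] := of_decide_eq_false hcs
          simp only [if_neg hne]
          have hlt := get_task_depth_unvis_add_key_lt hierarchy vis t cs hg hc
          exact get_task_depth_bridge_fold hierarchy f d (fun v hv => ih v hv)
            cs (d, PySem.Set.add vis t) rest res
            (by show get_task_depth_unvis hierarchy (PySem.Set.add vis t) + 1 ≤ f
                omega)

-- the fuel used by A's port suffices
lemma get_task_depth_fuel_ok (hierarchy : List (String × List String)) (vis : PySem.Set String) :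
    get_task_depth_unvis hierarchy vis + 1 ≤ hierarchy.length + 1 := by
  have h1 : get_task_depth_unvis hierarchy vis ≤ (hierarchy.map Prod.fst).length :=
    List.countP_le_length
  rw [List.length_map] at h1
  omega

-- ===== VERDICT (by name: the statement is the Claim_ definition above) =====
theorem get_task_depth_spec : Claim_equal_get_task_depth := by
  intro task hierarchy current_depth visited _
  unfold Spec_get_task_depth get_task_depth get_task_depth_alt
  set vis0 := (match visited with
    | none => PySem.Set.empty
    | some l => PySem.Set.ofList l) with hv
  rw [get_task_depth_bridge hierarchy (hierarchy.length + 1) vis0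
    (get_task_depth_fuel_ok hierarchy vis0) task current_depth [] current_depth]
  rw [get_task_depth_runB]
  exact (max_eq_right (get_task_depth_goA_fst_le hierarchy (hierarchy.length + 1)
    task current_depth vis0)).symm
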